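-- pv_equiv track=rewrite | github.com/duarte15/ListaDicionario | Questão-3.py | exibirBaratoProduto
-- ===== SOURCE A (Python) =====
-- def exibirBaratoProduto(produtos):
--
--   valid = False
--
--   nome=''
--
--   for x in produtos:
--
--     if valid == False:
--
--       menor = produtos[x]
--
--       nome=x
--
--       valid = True
--
--     if produtos[x]<menor:
--
--       menor=produtos[x]
--
--       nome=x
--   return nome
-- ===== SOURCE B (Python) =====
-- def exibirBaratoProduto(produtos):
--     if not produtos:
--         return ''
--     ordenados = sorted(produtos.items(), key=lambda kv: kv[1])
--     return ordenados[0][0]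
-- ===== Notes on version B (the rewrite author's own statement) =====
-- stated objective: idiomatic
-- what changed: Replaces A's running-minimum scan with manual valid/menor/nome state by a stable sort of the items by value followed by taking the first key (stability preserves A's first-wins tie-breaking), with an explicit empty-dict guard returning ''.
import Mathlib
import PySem

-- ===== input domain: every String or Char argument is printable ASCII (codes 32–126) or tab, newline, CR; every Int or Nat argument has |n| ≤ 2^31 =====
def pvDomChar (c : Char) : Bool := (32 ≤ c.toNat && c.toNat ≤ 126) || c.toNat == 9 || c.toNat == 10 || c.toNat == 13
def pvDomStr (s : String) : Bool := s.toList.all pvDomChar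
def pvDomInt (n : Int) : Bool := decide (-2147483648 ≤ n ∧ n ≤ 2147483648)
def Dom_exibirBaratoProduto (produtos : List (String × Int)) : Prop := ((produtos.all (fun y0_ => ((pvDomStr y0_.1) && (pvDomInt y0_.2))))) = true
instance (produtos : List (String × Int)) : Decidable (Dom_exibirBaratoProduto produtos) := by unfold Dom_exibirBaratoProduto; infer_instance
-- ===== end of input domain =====

-- B replaces A's running-minimum scan by a stable sort of the items by value and taking
-- the first key (stability preserves A's first-wins tie-breaking); objective: idiomatic.

-- ===== PORT A =====
-- 'for x in produtos' iterates the dict's keys; 'produtos[x]' is the dict lookup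
-- (ported as Dict.getD; under Pre_ the key is always present, so the default is never used).
-- pvStepA is the loop body: state = (valid, menor, nome).
def pvStepA (d : PySem.Dict String Int) (st : Bool × Int × String) (kv : String × Int) :
    Bool × Int × String :=
  let x := kv.1
  let px := PySem.Dict.getD d x 0
  let st1 := if st.1 = false then (true, px, x) else st
  if px < st1.2.1 then (true, px, x) else st1

def exibirBaratoProduto (produtos : List (String × Int)) : String :=
  (produtos.foldl (pvStepA (PySem.Dict.mk produtos)) (false, 0, "")).2.2

-- ===== PORT B =====
def exibirBaratoProduto_alt (produtos : List (String × Int)) : String :=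
  if produtos.isEmpty then ""
  else ((PySem.List.sorted produtos (fun kv => kv.2) false).headD ("", 0)).1

-- ===== PRECONDITION & SPEC =====
-- Pre_ requires the keys to be distinct: the Python parameter is a dict, which cannot hold
-- duplicate keys; the association-list encoding otherwise admits lists no dict corresponds to.
def Pre_exibirBaratoProduto (produtos : List (String × Int)) : Prop :=
  (produtos.map Prod.fst).Nodup
instance (produtos : List (String × Int)) : Decidable (Pre_exibirBaratoProduto produtos) := by
  unfold Pre_exibirBaratoProduto; infer_instance

def pvWitness_exibirBaratoProduto : (List (String × Int)) := [("a", 5), ("b", 3), ("c", 3)]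

def Spec_exibirBaratoProduto (produtos : List (String × Int)) (out : String) : Prop := out = exibirBaratoProduto_alt produtos
instance (produtos : List (String × Int)) (out : String) : Decidable (Spec_exibirBaratoProduto produtos out) := by unfold Spec_exibirBaratoProduto; infer_instance

-- ===== CLAIM (what is proved, stated in full; the proofs are below) =====
def Claim_equal_exibirBaratoProduto : Prop := ∀ (produtos : List (String × Int)), Dom_exibirBaratoProduto produtos → Pre_exibirBaratoProduto produtos → Spec_exibirBaratoProduto produtos (exibirBaratoProduto produtos)

-- ===== LEMMAS AND PROOFS =====

-- the common running-minimum combining step (first-wins on ties)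
def pvMinStep (m kv : String × Int) : String × Int := if kv.2 < m.2 then kv else m

-- distinct keys: dict lookup of a member's key returns that member's value
theorem pv_getD_of_mem (l : List (String × Int)) (hnd : (l.map Prod.fst).Nodup)
    (kv : String × Int) (hm : kv ∈ l) :
    PySem.Dict.getD (PySem.Dict.mk l) kv.1 0 = kv.2 := by
  induction l with
  | nil => cases hm
  | cons h t ih =>
    obtain ⟨k, v⟩ := h
    simp only [List.map_cons, List.nodup_cons] at hnd
    rcases List.mem_cons.mp hm with hkv | hkv
    · subst hkv
      simp [PySem.Dict.getD, PySem.Dict.get?_mk_cons]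
    · have hne : k ≠ kv.1 := by
        intro he
        exact hnd.1 (he ▸ List.mem_map_of_mem hkv)
      have hrec := ih hnd.2 hkv
      simp only [PySem.Dict.getD] at hrec ⊢
      rw [PySem.Dict.get?_mk_cons]
      simp only [beq_iff_eq, if_neg hne]
      exact hrec

-- A's loop from a valid state is the running minimum
theorem pvA_loop (d : PySem.Dict String Int) (l : List (String × Int))
    (hl : ∀ kv ∈ l, PySem.Dict.getD d kv.1 0 = kv.2) (m : String × Int) :
    l.foldl (pvStepA d) (true, m.2, m.1)
    = (true, (l.foldl pvMinStep m).2, (l.foldl pvMinStep m).1) := by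
  induction l generalizing m with
  | nil => rfl
  | cons kv t ih =>
    have hpx : PySem.Dict.getD d kv.1 0 = kv.2 := hl kv (List.mem_cons_self ..)
    have hstep : pvStepA d (true, m.2, m.1) kv
        = (true, (pvMinStep m kv).2, (pvMinStep m kv).1) := by
      simp only [pvStepA, hpx, pvMinStep]
      by_cases h : kv.2 < m.2 <;> simp [h]
    rw [List.foldl_cons, hstep, ih (fun p hp => hl p (List.mem_cons_of_mem _ hp)),
        List.foldl_cons]

-- head of the insertion-sort fold is the running minimum
theorem pvB_loop (l : List (String × Int)) (m : String × Int) (acc : List (String × Int)) :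
    (l.foldl (fun acc x => PySem.List.insertBy (fun a b => decide (a.2 < b.2)) x acc) (m :: acc)).headD ("", 0)
      = l.foldl pvMinStep m := by
  induction l generalizing m acc with
  | nil => rfl
  | cons x t ih =>
    rw [List.foldl_cons, List.foldl_cons]
    by_cases h : x.2 < m.2
    · have : PySem.List.insertBy (fun a b => decide (a.2 < b.2)) x (m :: acc)
          = x :: m :: acc := by simp [PySem.List.insertBy, h]
      rw [this, ih]
      have : pvMinStep m x = x := by simp [pvMinStep, h]
      rw [this]
    · have : PySem.List.insertBy (fun a b => decide (a.2 < b.2)) x (m :: acc)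
          = m :: PySem.List.insertBy (fun a b => decide (a.2 < b.2)) x acc := by
        simp [PySem.List.insertBy, h]
      rw [this, ih]
      have : pvMinStep m x = m := by simp [pvMinStep, h]
      rw [this]

-- ===== VERDICT (by name: the statement is the Claim_ definition above) =====
theorem exibirBaratoProduto_spec : Claim_equal_exibirBaratoProduto := by
  intro produtos _ hpre
  unfold Spec_exibirBaratoProduto exibirBaratoProduto exibirBaratoProduto_alt
  cases produtos with
  | nil => rfl
  | cons p t =>
    have hget : ∀ kv ∈ p :: t,
        PySem.Dict.getD (PySem.Dict.mk (p :: t)) kv.1 0 = kv.2 :=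
      fun kv hkv => pv_getD_of_mem (p :: t) hpre kv hkv
    have hp : PySem.Dict.getD (PySem.Dict.mk (p :: t)) p.1 0 = p.2 :=
      hget p (List.mem_cons_self ..)
    -- A side: the first iteration sets the state to (true, p.2, p.1)
    rw [List.foldl_cons]
    have hfirst : pvStepA (PySem.Dict.mk (p :: t)) (false, 0, "") p = (true, p.2, p.1) := by
      simp [pvStepA, hp]
    rw [hfirst, pvA_loop _ _ (fun kv hkv => hget kv (List.mem_cons_of_mem _ hkv)) p]
    -- B side: sorted is a fold of insertBy starting from [p]
    rw [PySem.List.sorted_eq_foldl_insertBy, List.foldl_cons]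
    have hins : PySem.List.insertBy (fun a b => decide (a.2 < b.2)) p ([] : List (String × Int))
        = [p] := by simp [PySem.List.insertBy]
    rw [hins, pvB_loop t p []]
    simp
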